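-- pv_equiv track=rewrite | github.com/sds1vrk/Algo_Study | programers_TEST_re/Section6_Greedy/pro3_boat.py | solution
-- ===== SOURCE A (Python) =====
-- def solution(people, limit):
--     cnt = 0
--     people.sort()
--     while people:
--         k = people.pop()
--         if people and k + people[0] <= limit:
--             people.remove(people[0])
--
--         cnt += 1
--
--     return cnt
-- ===== SOURCE B (Python) =====
-- def solution(people, limit):
--     arr = sorted(people)
--     i, j = 0, len(arr) - 1
--     cnt = 0
--     while i <= j:
--         if arr[i] + arr[j] <= limit:
--             i += 1
--         j -= 1
--         cnt += 1
--     return cnt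
-- ===== Notes on version B (the rewrite author's own statement) =====
-- stated objective: faster
-- what changed: Replaces the pop/remove loop on a mutating list (each people.remove is a linear scan, O(n^2) total) with the classic two-pointer sweep over the sorted array; B also leaves the caller's list unmutated (A sorts and empties it in place; return-value equivalence is what is proved).
import Mathlib
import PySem

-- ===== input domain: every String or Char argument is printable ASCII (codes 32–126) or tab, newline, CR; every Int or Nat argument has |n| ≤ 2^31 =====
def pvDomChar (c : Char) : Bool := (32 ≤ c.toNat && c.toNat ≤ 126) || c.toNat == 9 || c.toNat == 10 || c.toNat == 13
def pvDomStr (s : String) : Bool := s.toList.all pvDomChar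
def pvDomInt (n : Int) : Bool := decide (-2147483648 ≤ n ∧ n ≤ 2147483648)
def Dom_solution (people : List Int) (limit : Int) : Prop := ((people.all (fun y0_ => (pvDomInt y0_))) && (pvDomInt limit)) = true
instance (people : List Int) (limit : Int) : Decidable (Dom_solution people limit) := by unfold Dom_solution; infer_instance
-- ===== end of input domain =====

-- B replaces A's quadratic pop/remove loop by the two-pointer sweep over the sorted array.
-- Note: A mutates its argument (sorts and empties it in place); B does not — the equivalence
-- proved here is about the RETURN value only.

-- ===== PORT A =====
-- the while-loop of A: pop the last element k; if the list is still nonempty and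
-- k + people[0] <= limit, people.remove(people[0]) removes the first element
def solutionGo (limit : Int) (people : List Int) (cnt : Int) : Int :=
  if h : people = [] then cnt
  else
    let k := people.getLast h          -- k = people.pop()
    match hdl : people.dropLast with   -- the list after the pop
    | [] => cnt + 1                    -- loop body done, list empty: while exits with cnt+1
    | h0 :: t =>
      if k + h0 ≤ limit then
        solutionGo limit t (cnt + 1)         -- people.remove(people[0]) drops the first element
      else
        solutionGo limit (h0 :: t) (cnt + 1)
termination_by people.length
decreasing_by
  all_goals
    have hl : people.dropLast.length = people.length - 1 := by simp
    have hp : 0 < people.length := List.length_pos_iff.mpr (by assumption)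
    rw [hdl] at hl; simp at hl ⊢; omega

def solution (people : List Int) (limit : Int) : Int :=
  solutionGo limit (PySem.List.sorted people (fun x => x) false) 0

-- ===== PORT B =====
-- two-pointer loop of Source B; indices are always in range when dereferenced, so the
-- default of pyGetD is never used
def twoPtr (arr : List Int) (limit : Int) (i j cnt : Int) : Int :=
  if i ≤ j then
    twoPtr arr limit
      (if PySem.List.pyGetD arr i 0 + PySem.List.pyGetD arr j 0 ≤ limit then i + 1 else i)
      (j - 1) (cnt + 1)
  else cnt
termination_by (j + 1 - i).toNat
decreasing_by split_ifs <;> omega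

def solution_alt (people : List Int) (limit : Int) : Int :=
  let arr := PySem.List.sorted people (fun x => x) false
  twoPtr arr limit 0 ((arr.length : Int) - 1) 0

-- ===== PRECONDITION & SPEC =====
def Spec_solution (people : List Int) (limit : Int) (out : Int) : Prop := out = solution_alt people limit
instance (people : List Int) (limit : Int) (out : Int) : Decidable (Spec_solution people limit out) := by unfold Spec_solution; infer_instance

-- ===== CLAIM (what is proved, stated in full; the proofs are below) =====
def Claim_equal_solution : Prop := ∀ (people : List Int) (limit : Int), Dom_solution people limit → Spec_solution people limit (solution people limit)

-- ===== LEMMAS AND PROOFS =====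

-- the accumulator of A's loop only adds
lemma solutionGo_acc (limit : Int) : ∀ (n : Nat) (xs : List Int) (cnt : Int),
    xs.length = n → solutionGo limit xs cnt = cnt + solutionGo limit xs 0 := by
  intro n
  induction n using Nat.strong_induction_on with
  | _ n ih =>
    intro xs cnt hn
    by_cases hxs : xs = []
    · simp [solutionGo, hxs]
    · have hp : 0 < xs.length := List.length_pos_iff.mpr hxs
      have hl : xs.dropLast.length = xs.length - 1 := by simp
      rw [solutionGo, solutionGo]
      simp only [hxs, dite_false]
      split
      · simp
      · rename_i h0 t hdl
        have hlt : t.length < n := by rw [hdl] at hl; simp at hl ⊢; omega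
        split_ifs with hc
        · rw [ih t.length hlt t (cnt + 1) rfl, ih t.length hlt t (0 + 1) rfl]; ring
        · by_cases hne : (h0 :: t).length < n
          · rw [ih _ hne _ (cnt + 1) rfl, ih _ hne _ (0 + 1) rfl]; ring
          · exfalso; rw [hdl] at hl; simp at hl hne; omega

-- core: the two-pointer loop on indices p..q computes A's loop on the segment arr[p..q]
lemma twoPtr_eq_go (arr : List Int) (limit : Int) :
    ∀ (n : Nat), ∀ (p q : Nat) (cnt : Int), q < arr.length → q + 1 - p = n →
      twoPtr arr limit (p : Int) (q : Int) cnt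
        = cnt + solutionGo limit ((arr.drop p).take (q + 1 - p)) 0 := by
  intro n
  induction n using Nat.strong_induction_on with
  | _ n ih =>
    intro p q cnt hq hn
    by_cases hpq : q < p
    · -- empty segment: the while/if condition is false on both sides
      have h0 : q + 1 - p = 0 := by omega
      rw [twoPtr]
      have : ¬ ((p : Int) ≤ (q : Int)) := by omega
      simp [this, h0, solutionGo]
    · push Not at hpq   -- hpq : p ≤ q
      have hp : p < arr.length := by omega
      have hm : q + 1 - p = (q - p) + 1 := by omega
      have hsg : (arr.drop p).take (q + 1 - p) = (arr.drop p).take (q - p) ++ [arr[q]] := by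
        rw [hm, List.take_add_one, List.getElem?_drop]
        have : p + (q - p) = q := by omega
        rw [this, List.getElem?_eq_getElem hq]
        rfl
      have hgi : PySem.List.pyGetD arr (p : Int) 0 = arr[p] := by
        rw [PySem.List.pyGetD_natCast, List.getD_eq_getElem?_getD, List.getElem?_eq_getElem hp]; rfl
      have hgj : PySem.List.pyGetD arr (q : Int) 0 = arr[q] := by
        rw [PySem.List.pyGetD_natCast, List.getD_eq_getElem?_getD, List.getElem?_eq_getElem hq]; rfl
      rw [twoPtr]
      have hle : ((p : Int) ≤ (q : Int)) := by omega
      rw [if_pos hle, hgi, hgj, hsg]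
      rw [solutionGo]
      have hne : ¬ ((arr.drop p).take (q - p) ++ [arr[q]] = []) := by simp
      simp only [hne, dite_false, List.getLast_concat]
      by_cases hpq2 : p = q
      · -- one element left: both loops do one more step and stop
        subst hpq2
        have hrest : (arr.drop p).take (p - p) = ([] : List Int) := by simp
        have hstop : ∀ i' : Int, (p : Int) ≤ i' →
            twoPtr arr limit i' ((p : Int) - 1) (cnt + 1) = cnt + 1 := by
          intro i' hi'
          rw [twoPtr, if_neg (by omega)]
        rw [hstop _ (by split_ifs <;> omega)]
        split
        · omega
        · rename_i h0 t hdl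
          rw [List.dropLast_concat, hrest] at hdl
          exact absurd hdl (by simp)
      · -- p < q: the segment has at least two elements
        have hplt : p < q := by omega
        have hrest : (arr.drop p).take (q - p)
            = arr[p] :: (arr.drop (p + 1)).take (q - p - 1) := by
          have h1 : q - p = (q - p - 1) + 1 := by omega
          conv_lhs => rw [List.drop_eq_getElem_cons hp, h1]
          rw [List.take_succ_cons]
        have hcast2 : ((q : Int) - 1) = ((q - 1 : Nat) : Int) := by omega
        by_cases hc : arr[p] + arr[q] ≤ limit
        · rw [if_pos hc]
          have hcast : ((p : Int) + 1) = ((p + 1 : Nat) : Int) := by push_cast; ring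
          rw [hcast, hcast2,
            ih ((q - 1) + 1 - (p + 1)) (by omega) (p + 1) (q - 1) (cnt + 1) (by omega) rfl]
          split
          · rename_i hdl
            rw [List.dropLast_concat, hrest] at hdl
            exact absurd hdl (by simp)
          · rename_i h0 t hdl
            rw [List.dropLast_concat, hrest] at hdl
            injection hdl with e1 e2
            subst e1; subst e2
            rw [if_pos (by omega : arr[q] + arr[p] ≤ limit)]
            have hseg2 : (q - 1) + 1 - (p + 1) = q - p - 1 := by omega
            rw [hseg2, solutionGo_acc limit _ _ (0 + 1) rfl]
            ring
        · rw [if_neg hc]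
          rw [hcast2, ih ((q - 1) + 1 - p) (by omega) p (q - 1) (cnt + 1) (by omega) rfl]
          have hseg2 : (q - 1) + 1 - p = q - p := by omega
          rw [hseg2, hrest]
          split
          · rename_i hdl
            rw [List.dropLast_concat] at hdl
            exact absurd hdl (by simp)
          · rename_i h0 t hdl
            rw [List.dropLast_concat] at hdl
            injection hdl with e1 e2
            subst e1; subst e2
            rw [if_neg (by omega : ¬ (arr[q] + arr[p] ≤ limit))]
            rw [solutionGo_acc limit _ _ (0 + 1) rfl]
            ring

theorem solution_eq_alt (people : List Int) (limit : Int) :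
    solution people limit = solution_alt people limit := by
  unfold solution solution_alt
  show solutionGo limit (PySem.List.sorted people (fun x => x) false) 0
      = twoPtr (PySem.List.sorted people (fun x => x) false) limit 0
          (((PySem.List.sorted people (fun x => x) false).length : Int) - 1) 0
  generalize PySem.List.sorted people (fun x => x) false = arr
  rcases Nat.eq_zero_or_pos arr.length with hl | hl
  · have h : arr = [] := List.length_eq_zero_iff.mp hl
    subst h
    rw [twoPtr, if_neg (by norm_num), solutionGo]
    simp
  · have hseg : (arr.drop 0).take (arr.length - 1 + 1 - 0) = arr := by
      rw [List.drop_zero]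
      exact List.take_of_length_le (by omega)
    have h2 := twoPtr_eq_go arr limit (arr.length - 1 + 1 - 0) 0 (arr.length - 1) 0
      (by omega) rfl
    rw [hseg] at h2
    simp only [Nat.cast_zero] at h2
    have hcast : ((arr.length : Int) - 1) = ((arr.length - 1 : Nat) : Int) := by omega
    rw [hcast, h2]
    ring

-- ===== VERDICT (by name: the statement is the Claim_ definition above) =====
theorem solution_spec : Claim_equal_solution := by
  intro people limit _
  unfold Spec_solution
  exact solution_eq_alt people limit
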